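-- pv_equiv track=rewrite | github.com/meereeum/lsbeer | get_beer.py | get_info_ranked
-- ===== SOURCE A (Python) =====
-- def get_info_ranked(d_stats, k_info, l_ranked_ks=['untappd', 'beermenus',
--                                                   'ratebeer', 'beeradvocate']):
--     """
--     dict of beer stats, key for info, list of ranked keys -> info under highest ranked key available
--        i.e. d_stats[highest_ranked_k_in_l][k_info]
--     """
--     if not l_ranked_ks: # base case: info not found in any of ranked keys
--         return ''
--
--     top_k, *rest = l_ranked_ks
--     try:
--         return d_stats[top_k][k_info]
--     except(KeyError):
--         return get_info_ranked(d_stats, k_info, rest)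
-- ===== SOURCE B (Python) =====
-- def get_info_ranked(d_stats, k_info, l_ranked_ks=['untappd', 'beermenus',
--                                                   'ratebeer', 'beeradvocate']):
--     for k in l_ranked_ks:
--         try:
--             return d_stats[k][k_info]
--         except KeyError:
--             continue
--     return ''
-- ===== Notes on version B (the rewrite author's own statement) =====
-- stated objective: idiomatic
-- what changed: Replaced the list-destructuring recursion with a single flat for-loop that returns the first successful lookup and falls through to ''.
import Mathlib
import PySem

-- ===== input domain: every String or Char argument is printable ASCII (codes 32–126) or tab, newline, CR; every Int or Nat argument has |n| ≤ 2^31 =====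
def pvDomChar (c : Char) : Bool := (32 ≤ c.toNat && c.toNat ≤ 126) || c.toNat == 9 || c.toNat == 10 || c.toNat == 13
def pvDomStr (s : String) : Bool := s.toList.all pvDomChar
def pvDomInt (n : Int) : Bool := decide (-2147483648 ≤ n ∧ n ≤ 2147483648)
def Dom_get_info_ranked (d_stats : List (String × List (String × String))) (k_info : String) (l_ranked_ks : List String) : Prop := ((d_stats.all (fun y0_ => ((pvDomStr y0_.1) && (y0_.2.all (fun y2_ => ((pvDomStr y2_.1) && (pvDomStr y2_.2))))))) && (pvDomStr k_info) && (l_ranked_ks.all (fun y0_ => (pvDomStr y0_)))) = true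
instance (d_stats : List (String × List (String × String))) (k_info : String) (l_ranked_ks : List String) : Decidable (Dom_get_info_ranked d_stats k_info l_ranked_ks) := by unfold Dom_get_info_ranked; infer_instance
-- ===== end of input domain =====

-- ===== PORT A =====
-- assoc-list lookup = Python dict lookup (first match)
def pvLookup (xs : List (String × (List (String × String)))) (k : String) : Option (List (String × String)) :=
  (xs.find? (fun p => p.1 == k)).map (·.2)

def pvLookupS (xs : List (String × String)) (k : String) : Option String :=
  (xs.find? (fun p => p.1 == k)).map (·.2)

-- B is iterative where A recurses; the header line: B replaces the recursion by one flat loop (idiomatic).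
def get_info_ranked (d_stats : List (String × List (String × String))) (k_info : String) (l_ranked_ks : List String) : String :=
  match l_ranked_ks with
  | [] => ""
  | top_k :: rest =>
    match pvLookup d_stats top_k with
    | none => get_info_ranked d_stats k_info rest          -- KeyError on outer lookup
    | some d =>
      match pvLookupS d k_info with
      | none => get_info_ranked d_stats k_info rest        -- KeyError on inner lookup
      | some v => v

-- ===== PORT B =====
-- loop over l_ranked_ks, first successful double lookup wins; fall through to ""
def get_info_ranked_alt (d_stats : List (String × List (String × String))) (k_info : String) (l_ranked_ks : List String) : String :=
  (l_ranked_ks.findSome? (fun k => (pvLookup d_stats k).bind (fun d => pvLookupS d k_info))).getD ""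

-- ===== PRECONDITION & SPEC =====
def Spec_get_info_ranked (d_stats : List (String × List (String × String))) (k_info : String) (l_ranked_ks : List String) (out : String) : Prop := out = get_info_ranked_alt d_stats k_info l_ranked_ks
instance (d_stats : List (String × List (String × String))) (k_info : String) (l_ranked_ks : List String) (out : String) : Decidable (Spec_get_info_ranked d_stats k_info l_ranked_ks out) := by unfold Spec_get_info_ranked; infer_instance

-- ===== CLAIM (what is proved, stated in full; the proofs are below) =====
def Claim_equal_get_info_ranked : Prop := ∀ (d_stats : List (String × List (String × String))) (k_info : String) (l_ranked_ks : List String), Dom_get_info_ranked d_stats k_info l_ranked_ks → Spec_get_info_ranked d_stats k_info l_ranked_ks (get_info_ranked d_stats k_info l_ranked_ks)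

-- ===== LEMMAS AND PROOFS =====

-- ===== VERDICT (by name: the statement is the Claim_ definition above) =====
theorem agree (d_stats : List (String × List (String × String))) (k_info : String) (l_ranked_ks : List String) :
    get_info_ranked d_stats k_info l_ranked_ks = get_info_ranked_alt d_stats k_info l_ranked_ks := by
  induction l_ranked_ks with
  | nil => rfl
  | cons top_k rest ih =>
    simp only [get_info_ranked, get_info_ranked_alt, List.findSome?_cons] at *
    cases h1 : pvLookup d_stats top_k with
    | none => simpa [h1] using ih
    | some d =>
      cases h2 : pvLookupS d k_info with
      | none => simpa [h1, h2] using ih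
      | some v => simp [h1, h2]

theorem get_info_ranked_spec : Claim_equal_get_info_ranked := by
  intro d_stats k_info l_ranked_ks _
  unfold Spec_get_info_ranked
  exact agree d_stats k_info l_ranked_ks
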